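-- pv_equiv track=rewrite | github.com/Peachypie98/programmers-python | 프로그래머스/레벨1/x만큼 간격이 있는 n개의 숫자.py | solution
-- ===== SOURCE A (Python) =====
-- def solution(x, n):
--     # special case
--     if x == 0:
--         return [0]*n
--
--     answer = []
--     if x > 0:
--         for i in range(x,n*x+1,x):
--             answer.append(i)
--     else:
--         x = x*-1
--         for i in range(x, n*x+1, x):
--             answer.append(i)
--         for idx, i in enumerate(answer):
--             answer[idx] = answer[idx]*-1
--     return answer
-- ===== SOURCE B (Python) =====
-- def solution(x, n):
--     return [x * i for i in range(1, n + 1)]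
-- ===== Notes on version B (the rewrite author's own statement) =====
-- stated objective: simpler
-- what changed: B computes each term directly as x*i over range(1, n+1) in one comprehension, removing A's x==0 special case, sign split, stepped range and the second negation pass.
import Mathlib
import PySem

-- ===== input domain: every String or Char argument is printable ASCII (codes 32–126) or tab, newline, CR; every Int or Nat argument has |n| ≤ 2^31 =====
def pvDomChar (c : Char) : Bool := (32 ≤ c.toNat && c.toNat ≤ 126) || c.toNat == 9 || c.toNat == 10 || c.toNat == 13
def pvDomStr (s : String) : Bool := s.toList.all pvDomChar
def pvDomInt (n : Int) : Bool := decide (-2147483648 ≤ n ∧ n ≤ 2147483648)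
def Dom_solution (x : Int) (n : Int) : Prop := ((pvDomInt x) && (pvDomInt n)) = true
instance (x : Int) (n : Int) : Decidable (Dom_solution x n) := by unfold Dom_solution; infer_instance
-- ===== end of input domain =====

-- B replaces A's x==0 special case, sign-split stepped ranges and negation pass
-- with one direct comprehension [x*i for i in range(1, n+1)] (objective: simpler).

-- ===== PORT A =====
def solution (x : Int) (n : Int) : List Int :=
  if x == 0 then List.replicate n.toNat 0      -- [0]*n
  else if x > 0 then
    (PySem.List.pyRange x (n * x + 1) x).foldl (fun acc i => acc ++ [i]) []
  else
    let x' := x * -1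
    let answer := (PySem.List.pyRange x' (n * x' + 1) x').foldl (fun acc i => acc ++ [i]) []
    (PySem.List.enumerate answer 0).foldl
      (fun acc p => acc.set p.1.toNat (PySem.List.pyGetD acc p.1 0 * -1)) answer

-- ===== PORT B =====
def solution_alt (x : Int) (n : Int) : List Int :=
  (PySem.List.pyRange 1 (n + 1) 1).map (fun i => x * i)

-- ===== PRECONDITION & SPEC =====
def Spec_solution (x : Int) (n : Int) (out : List Int) : Prop := out = solution_alt x n
instance (x : Int) (n : Int) (out : List Int) : Decidable (Spec_solution x n out) := by unfold Spec_solution; infer_instance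

-- ===== CLAIM (what is proved, stated in full; the proofs are below) =====
def Claim_equal_solution : Prop := ∀ (x : Int) (n : Int), Dom_solution x n → Spec_solution x n (solution x n)

-- ===== LEMMAS AND PROOFS =====

theorem foldl_append_singleton (l acc : List Int) :
    l.foldl (fun acc i => acc ++ [i]) acc = acc ++ l := by
  induction l generalizing acc with
  | nil => simp
  | cons a l ih => simp [List.foldl, ih]

theorem pyGetD_mid (pre : List Int) (a : Int) (l : List Int) :
    PySem.List.pyGetD (pre ++ a :: l) (pre.length : Int) 0 = a := by
  rw [PySem.List.pyGetD_natCast]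
  simp

theorem set_mid (pre : List Int) (a v : Int) (l : List Int) :
    (pre ++ a :: l).set pre.length v = (pre ++ [v]) ++ l := by
  induction pre with
  | nil => simp
  | cons b pre ih => simp [ih]

theorem negate_loop (l pre : List Int) :
    (PySem.List.enumerate l (pre.length : Int)).foldl
      (fun acc p => acc.set p.1.toNat (PySem.List.pyGetD acc p.1 0 * -1)) (pre ++ l)
    = pre ++ l.map (· * -1) := by
  induction l generalizing pre with
  | nil => simp [PySem.List.enumerate]
  | cons a l ih =>
    rw [PySem.List.enumerate_cons]
    simp only [List.foldl]
    rw [pyGetD_mid, Int.toNat_natCast, set_mid]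
    have h1 : ((pre.length : Int) + 1) = ((pre ++ [a * -1]).length : Int) := by simp
    rw [h1, ih (pre ++ [a * -1])]
    simp

theorem pyRange_step_pos (x n : Int) (hx : 0 < x) :
    PySem.List.pyRange x (n * x + 1) x
    = (List.range n.toNat).map (fun k : Nat => x + x * (k : Int)) := by
  rw [PySem.List.pyRange_of_pos _ _ hx]
  have hcnt : (if x < n * x + 1 then ((n * x + 1 - x + x - 1) / x).toNat else 0) = n.toNat := by
    by_cases hn : 1 ≤ n
    · have hlt : x < n * x + 1 := by nlinarith
      rw [if_pos hlt]
      have h2 : n * x + 1 - x + x - 1 = n * x := by ring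
      rw [h2, Int.mul_ediv_cancel _ (by omega)]
    · have hle : ¬ x < n * x + 1 := by nlinarith
      rw [if_neg hle]
      omega
  rw [hcnt]

theorem alt_eq_map_range (x n : Int) :
    solution_alt x n = (List.range n.toNat).map (fun k : Nat => x + x * (k : Int)) := by
  unfold solution_alt
  rw [PySem.List.pyRange_one]
  have : (n + 1 - 1).toNat = n.toNat := by omega
  rw [this, List.map_map]
  refine List.map_congr_left ?_
  intro k _
  simp
  ring

-- ===== VERDICT (by name: the statement is the Claim_ definition above) =====
theorem solution_spec : Claim_equal_solution := by
  intro x n _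
  show solution x n = solution_alt x n
  rw [alt_eq_map_range]
  unfold solution
  by_cases h0 : x = 0
  · simp only [h0, beq_self_eq_true, if_true]
    refine (List.eq_replicate_iff.mpr ⟨by simp, ?_⟩).symm
    intro b hb
    simp at hb
    obtain ⟨k, _, hk⟩ := hb
    omega
  · rw [if_neg (by simpa using h0)]
    by_cases hp : x > 0
    · rw [if_pos hp, foldl_append_singleton, pyRange_step_pos x n hp]
      simp
    · rw [if_neg hp]
      have hx' : 0 < x * -1 := by omega
      simp only []
      rw [foldl_append_singleton, List.nil_append]
      have := negate_loop ((PySem.List.pyRange (x * -1) (n * (x * -1) + 1) (x * -1))) []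
      simp only [List.length_nil, Nat.cast_zero, List.nil_append] at this
      rw [this, pyRange_step_pos _ n hx', List.map_map]
      refine List.map_congr_left ?_
      intro k _
      simp
      ring
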